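-- pv_equiv track=rewrite | github.com/mr3od/passport-reader | passport-core/src/passport_core/mrz/parser.py | validate_mrz
-- ===== SOURCE A (Python) =====
-- from dataclasses import dataclass, field
--
-- _WEIGHTS = (7, 3, 1)
--
-- _CHAR_VALUES: dict[str, int] = {str(i): i for i in range(10)}
--
-- def check_digit(s: str) -> int:
--     """Compute a single MRZ check digit over *s*."""
--     total = 0
--     for i, ch in enumerate(s):
--         total += _CHAR_VALUES.get(ch, 0) * _WEIGHTS[i % 3]
--     return total % 10
--
-- @dataclass
-- class CheckDigitResult:
--     name: str
--     expected: int
--     computed: int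
--
--     @property
--     def ok(self) -> bool:
--         return self.expected == self.computed
--
-- def validate_mrz(line2: str | None) -> tuple[bool, list[str]]:
--     """Quick validation of MRZ line 2 check digits.
--
--     Returns ``(all_pass, [warning_strings])``.
--     """
--     if not line2:
--         return False, ["MRZ line 2 missing"]
--
--     line2 = line2.replace(" ", "").upper()
--     if len(line2) < 44:
--         return False, [f"MRZ line 2 length is {len(line2)}, expected 44"]
--
--     warnings: list[str] = []
--     checks: list[CheckDigitResult] = []
--
--     if line2[9].isdigit():
--         checks.append(CheckDigitResult("passport_number", int(line2[9]), check_digit(line2[0:9])))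
--     if line2[19].isdigit():
--         checks.append(CheckDigitResult("dob", int(line2[19]), check_digit(line2[13:19])))
--     if line2[27].isdigit():
--         checks.append(CheckDigitResult("expiry", int(line2[27]), check_digit(line2[21:27])))
--     if line2[42].isdigit():
--         checks.append(CheckDigitResult("optional_data", int(line2[42]), check_digit(line2[28:42])))
--
--     composite = line2[0:10] + line2[13:20] + line2[21:43]
--     if line2[43].isdigit():
--         checks.append(CheckDigitResult("overall", int(line2[43]), check_digit(composite)))
--
--     all_pass = all(c.ok for c in checks)
--     if not all_pass:
--         failed = [c.name for c in checks if not c.ok]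
--         warnings.append(f"Check digit failures: {', '.join(failed)}")
--
--     return all_pass, warnings
-- ===== SOURCE B (Python) =====
-- def _digit_sum(s: str) -> int:
--     """Sum of the digit characters' values in s (non-digits contribute 0)."""
--     return sum(ord(c) - 48 for c in s if c.isdigit())
--
-- def check_digit(data: str) -> int:
--     """MRZ check digit by residue-class bucketing: the 7,3,1 weights repeat with
--     period 3, so the weighted sum is 7*digitsum(data[0::3]) + 3*digitsum(data[1::3])
--     + digitsum(data[2::3]); no per-character weight selection is needed."""
--     return (7 * _digit_sum(data[0::3])
--             + 3 * _digit_sum(data[1::3])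
--             + _digit_sum(data[2::3])) % 10
--
-- def validate_mrz(line2):
--     """Quick validation of MRZ line 2 check digits.
--
--     Returns ``(all_pass, [warning_strings])``.
--     """
--     if not line2:
--         return False, ["MRZ line 2 missing"]
--     s = line2.replace(" ", "").upper()
--     if len(s) < 44:
--         return False, [f"MRZ line 2 length is {len(s)}, expected 44"]
--     fields = [
--         ("passport_number", 9, s[0:9]),
--         ("dob", 19, s[13:19]),
--         ("expiry", 27, s[21:27]),
--         ("optional_data", 42, s[28:42]),
--         ("overall", 43, s[0:10] + s[13:20] + s[21:43]),
--     ]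
--     failed = [name for name, pos, data in fields
--               if s[pos].isdigit() and ord(s[pos]) - 48 != check_digit(data)]
--     if failed:
--         return False, ["Check digit failures: " + ", ".join(failed)]
--     return True, []
-- ===== Notes on version B (the rewrite author's own statement) =====
-- stated objective: alternative
-- what changed: The check digit is computed by residue-class bucketing - since the 7,3,1 weights repeat with period 3, B takes the three stride-3 slices s[0::3], s[1::3], s[2::3], digit-sums each bucket once, and combines 7*b0+3*b1+b2 mod 10, eliminating the per-character weight lookup/enumerate of A entirely; the outer unrolled if-blocks and the CheckDigitResult dataclass are replaced by a table of the five fields filtered in one comprehension.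
import Mathlib
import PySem

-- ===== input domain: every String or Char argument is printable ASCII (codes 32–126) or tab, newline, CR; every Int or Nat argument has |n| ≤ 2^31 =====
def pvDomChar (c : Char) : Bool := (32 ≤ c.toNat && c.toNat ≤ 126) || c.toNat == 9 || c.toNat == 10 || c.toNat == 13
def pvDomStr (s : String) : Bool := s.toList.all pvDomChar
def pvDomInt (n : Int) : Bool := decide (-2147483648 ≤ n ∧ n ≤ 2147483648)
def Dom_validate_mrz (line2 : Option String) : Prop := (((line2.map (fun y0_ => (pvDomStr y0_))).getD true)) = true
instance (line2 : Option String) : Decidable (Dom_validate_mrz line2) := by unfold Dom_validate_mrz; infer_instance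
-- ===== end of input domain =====

-- B computes each check digit by residue-class bucketing (7*digitsum(s[0::3]) + 3*digitsum(s[1::3])
-- + digitsum(s[2::3]), mod 10) instead of A's enumerate/weight-lookup loop, and replaces the
-- unrolled dataclass-appending if-blocks by a table of the five fields filtered in one pass.

-- ===== PORT A =====
-- _WEIGHTS = (7, 3, 1), indexed by i % 3
def pvWeightsA : List Int := [7, 3, 1]

-- _CHAR_VALUES.get(ch, 0): the dict {str(i): i for i in range(10)} maps exactly the chars '0'..'9'
-- to their values; the lookup-with-default is ported by hand as this test (exact for every Char).
def pvCharVal (c : Char) : Int :=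
  if 48 ≤ c.toNat ∧ c.toNat ≤ 57 then (c.toNat : Int) - 48 else 0

-- check_digit(s): total over enumerate(s), weight _WEIGHTS[i % 3], then total % 10
def check_digitA (cs : List Char) : Int :=
  PySem.Int.mod
    ((PySem.List.enumerate cs).foldl
      (fun total p => total + pvCharVal p.2 * PySem.List.pyGetD pvWeightsA (PySem.Int.mod p.1 3) 0) 0)
    10

-- f"MRZ line 2 length is {len(line2)}, expected 44"
def pvLenMsg (n : Int) : String :=
  String.ofList ("MRZ line 2 length is ".toList ++ PySem.Int.toChars n ++ ", expected 44".toList)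

-- "Check digit failures: " + ", ".join(failed)
def pvFailMsg (failed : List String) : String :=
  String.ofList ("Check digit failures: ".toList ++ PySem.Chars.join ", ".toList (failed.map String.toList))

def validate_mrz (line2 : Option String) : Bool × List String :=
  match line2 with
  | none => (false, ["MRZ line 2 missing"])      -- 'if not line2' (None)
  | some s0 =>
    if s0.toList.isEmpty then (false, ["MRZ line 2 missing"])   -- 'if not line2' (empty string)
    else
      let cs := PySem.Chars.upper (PySem.Chars.replace s0.toList [' '] [])
      if cs.length < 44 then (false, [pvLenMsg cs.length])
      else
        -- CheckDigitResult(name, expected, computed) is ported as the triple (name, expected, computed);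
        -- int(line2[pos]) under the isdigit guard is exactly (char value - 48).
        let checks0 : List (String × Int × Int) := []
        let c9 := PySem.List.pyGetD cs 9 ' '
        let checks1 := if PySem.Chars.isdigit c9 then
          checks0 ++ [("passport_number", (c9.toNat : Int) - 48, check_digitA (PySem.List.slice cs (some 0) (some 9)))] else checks0
        let c19 := PySem.List.pyGetD cs 19 ' '
        let checks2 := if PySem.Chars.isdigit c19 then
          checks1 ++ [("dob", (c19.toNat : Int) - 48, check_digitA (PySem.List.slice cs (some 13) (some 19)))] else checks1
        let c27 := PySem.List.pyGetD cs 27 ' '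
        let checks3 := if PySem.Chars.isdigit c27 then
          checks2 ++ [("expiry", (c27.toNat : Int) - 48, check_digitA (PySem.List.slice cs (some 21) (some 27)))] else checks2
        let c42 := PySem.List.pyGetD cs 42 ' '
        let checks4 := if PySem.Chars.isdigit c42 then
          checks3 ++ [("optional_data", (c42.toNat : Int) - 48, check_digitA (PySem.List.slice cs (some 28) (some 42)))] else checks3
        let composite := PySem.List.slice cs (some 0) (some 10) ++ PySem.List.slice cs (some 13) (some 20)
                           ++ PySem.List.slice cs (some 21) (some 43)
        let c43 := PySem.List.pyGetD cs 43 ' '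
        let checks5 := if PySem.Chars.isdigit c43 then
          checks4 ++ [("overall", (c43.toNat : Int) - 48, check_digitA composite)] else checks4
        let all_pass := checks5.all (fun c => c.2.1 == c.2.2)
        let warnings := if !all_pass then
            [pvFailMsg ((checks5.filter (fun c => !(c.2.1 == c.2.2))).map (·.1))]
          else []
        (all_pass, warnings)

-- ===== PORT B =====
-- the stride-3 slice data[0::3], ported by hand (exact: every third element from the head)
def pvEvery3 : List Char → List Char
  | [] => []
  | c :: cs => c :: pvEvery3 (cs.drop 2)
termination_by cs => cs.length
decreasing_by simp

-- _digit_sum(s) = sum(ord(c) - 48 for c in s if c.isdigit())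
def pvDigitSum (cs : List Char) : Int :=
  ((cs.filter PySem.Chars.isdigit).map (fun c => (c.toNat : Int) - 48)).foldl (· + ·) 0

-- check_digit by residue-class bucketing; data[k::3] = pvEvery3 (cs.drop k)
def pvCheckB (cs : List Char) : Int :=
  PySem.Int.mod
    (7 * pvDigitSum (pvEvery3 cs) + 3 * pvDigitSum (pvEvery3 (cs.drop 1))
       + pvDigitSum (pvEvery3 (cs.drop 2))) 10

def validate_mrz_alt (line2 : Option String) : Bool × List String :=
  match line2 with
  | none => (false, ["MRZ line 2 missing"])
  | some s0 =>
    if s0.toList.isEmpty then (false, ["MRZ line 2 missing"])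
    else
      let cs := PySem.Chars.upper (PySem.Chars.replace s0.toList [' '] [])
      if cs.length < 44 then (false, [pvLenMsg cs.length])
      else
        let fields : List (String × Int × List Char) :=
          [("passport_number", 9, PySem.List.slice cs (some 0) (some 9)),
           ("dob", 19, PySem.List.slice cs (some 13) (some 19)),
           ("expiry", 27, PySem.List.slice cs (some 21) (some 27)),
           ("optional_data", 42, PySem.List.slice cs (some 28) (some 42)),
           ("overall", 43, PySem.List.slice cs (some 0) (some 10) ++ PySem.List.slice cs (some 13) (some 20)
                             ++ PySem.List.slice cs (some 21) (some 43))]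
        let failed := (fields.filter (fun f =>
            let c := PySem.List.pyGetD cs f.2.1 ' '
            PySem.Chars.isdigit c && !(((c.toNat : Int) - 48) == pvCheckB f.2.2))).map (·.1)
        if !failed.isEmpty then (false, [pvFailMsg failed])
        else (true, [])

-- ===== PRECONDITION & SPEC =====
def Spec_validate_mrz (line2 : Option String) (out : Bool × List String) : Prop := out = validate_mrz_alt line2
instance (line2 : Option String) (out : Bool × List String) : Decidable (Spec_validate_mrz line2 out) := by unfold Spec_validate_mrz; infer_instance

-- ===== CLAIM (what is proved, stated in full; the proofs are below) =====
def Claim_equal_validate_mrz : Prop := ∀ (line2 : Option String), Dom_validate_mrz line2 → Spec_validate_mrz line2 (validate_mrz line2)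

-- ===== LEMMAS AND PROOFS =====

lemma pv_isdigit_iff (c : Char) : PySem.Chars.isdigit c = true ↔ (48 ≤ c.toNat ∧ c.toNat ≤ 57) := by
  simp only [PySem.Chars.isdigit, Bool.and_eq_true, decide_eq_true_eq, Char.le_def,
    UInt32.le_iff_toNat_le]
  exact Iff.rfl

-- mathematical digit sum
def pvDSum (cs : List Char) : Int := (cs.map pvCharVal).sum

lemma pvDigitSum_eq (cs : List Char) : pvDigitSum cs = pvDSum cs := by
  have h : ∀ (l : List Int) (t : Int), l.foldl (· + ·) t = t + l.sum := by
    intro l; induction l with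
    | nil => intro t; simp
    | cons x xs ih => intro t; simp [ih]; ring
  unfold pvDigitSum pvDSum
  rw [h]
  simp only [zero_add]
  induction cs with
  | nil => rfl
  | cons c cs ih =>
    by_cases hd : PySem.Chars.isdigit c = true
    · have hb := (pv_isdigit_iff c).1 hd
      simp [hd, pvCharVal, hb.1, hb.2, ih]
    · have hb : ¬(48 ≤ c.toNat ∧ c.toNat ≤ 57) := fun hb => hd ((pv_isdigit_iff c).2 hb)
      simp [hd, pvCharVal, hb, ih]

-- weight by residue class
def pvW (r : Nat) : Int := PySem.List.pyGetD pvWeightsA (r : Int) 0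

lemma pvEvery3_nil : pvEvery3 [] = [] := by
  conv_lhs => rw [pvEvery3.eq_def]

lemma pvEvery3_cons (c : Char) (cs : List Char) :
    pvEvery3 (c :: cs) = c :: pvEvery3 (cs.drop 2) := by
  conv_lhs => rw [pvEvery3.eq_def]

-- A's enumerate-fold from index i equals the three buckets weighted by (i+k) % 3
lemma pv_buckets (cs : List Char) : ∀ (i : Nat) (t : Int),
    (PySem.List.enumerate cs (i : Int)).foldl
      (fun total p => total + pvCharVal p.2 * PySem.List.pyGetD pvWeightsA (PySem.Int.mod p.1 3) 0) t
    = t + pvW (i % 3) * pvDSum (pvEvery3 cs)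
        + pvW ((i + 1) % 3) * pvDSum (pvEvery3 (cs.drop 1))
        + pvW ((i + 2) % 3) * pvDSum (pvEvery3 (cs.drop 2)) := by
  induction cs with
  | nil =>
    intro i t; simp [PySem.List.enumerate, pvEvery3_nil, pvDSum]
  | cons c cs ih =>
    intro i t
    rw [PySem.List.enumerate_cons]
    simp only [List.foldl_cons]
    have hi1 : ((i : Int) + 1) = ((i + 1 : Nat) : Int) := by push_cast; ring
    rw [hi1, ih (i + 1)]
    have hmod : PySem.Int.mod (i : Int) 3 = ((i % 3 : Nat) : Int) := PySem.Int.mod_natCast i 3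
    rw [hmod]
    have h3 : (i + 1 + 2) % 3 = i % 3 := by omega
    rw [h3]
    have hdrop1 : (c :: cs).drop 1 = cs := rfl
    have hdrop2 : (c :: cs).drop 2 = cs.drop 1 := by
      cases cs <;> rfl
    rw [hdrop1, hdrop2, pvEvery3_cons]
    have hsum : pvDSum (c :: pvEvery3 (cs.drop 2)) = pvCharVal c + pvDSum (pvEvery3 (cs.drop 2)) := by
      simp [pvDSum]
    rw [hsum]
    have hw : PySem.List.pyGetD pvWeightsA ((i % 3 : Nat) : Int) 0 = pvW (i % 3) := rfl
    rw [hw]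
    have h12 : (i + 1 + 1) % 3 = (i + 2) % 3 := by omega
    rw [h12]
    ring

lemma pvCheck_eq (cs : List Char) : check_digitA cs = pvCheckB cs := by
  unfold check_digitA pvCheckB
  have h := pv_buckets cs 0 0
  rw [Nat.cast_zero] at h
  rw [h]
  simp only [pvDigitSum_eq]
  have h0 : pvW (0 % 3) = 7 := by decide
  have h1 : pvW ((0 + 1) % 3) = 3 := by decide
  have h2 : pvW ((0 + 2) % 3) = 1 := by decide
  rw [h0, h1, h2]
  congr 1
  ring

-- proof-side views of the five checked fields
def pvDigitAt (cs : List Char) (f : String × Int × List Char) : Bool :=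
  PySem.Chars.isdigit (PySem.List.pyGetD cs f.2.1 ' ')

def pvTriple (cs : List Char) (f : String × Int × List Char) : String × Int × Int :=
  (f.1, ((PySem.List.pyGetD cs f.2.1 ' ').toNat : Int) - 48, pvCheckB f.2.2)

def pvFields (cs : List Char) : List (String × Int × List Char) :=
  [("passport_number", 9, PySem.List.slice cs (some 0) (some 9)),
   ("dob", 19, PySem.List.slice cs (some 13) (some 19)),
   ("expiry", 27, PySem.List.slice cs (some 21) (some 27)),
   ("optional_data", 42, PySem.List.slice cs (some 28) (some 42)),
   ("overall", 43, PySem.List.slice cs (some 0) (some 10) ++ PySem.List.slice cs (some 13) (some 20)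
                     ++ PySem.List.slice cs (some 21) (some 43))]

-- A's conditional-append chain is a fold; it appends exactly the digit-guarded fields
lemma pv_chain (cs : List Char) (fs : List (String × Int × List Char)) (acc : List (String × Int × Int)) :
    fs.foldl (fun a f => if pvDigitAt cs f then a ++ [pvTriple cs f] else a) acc
      = acc ++ (fs.filter (pvDigitAt cs)).map (pvTriple cs) := by
  induction fs generalizing acc with
  | nil => simp
  | cons f fs ih => by_cases h : pvDigitAt cs f <;> simp [h, ih]

-- 'all pass' is 'the failed-name list is empty'
lemma pv_all_eq {α β : Type} (L : List α) (p : α → Bool) (f : α → β) :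
    L.all p = ((L.filter (fun a => !p a)).map f).isEmpty := by
  induction L with
  | nil => rfl
  | cons x xs ih => by_cases h : p x <;> simp [h, ih]

-- the whole length-≥-44 branch of A equals B's branch
lemma pv_branch (cs : List Char) :
    (let checks0 : List (String × Int × Int) := []
     let c9 := PySem.List.pyGetD cs 9 ' '
     let checks1 := if PySem.Chars.isdigit c9 then
       checks0 ++ [("passport_number", (c9.toNat : Int) - 48, check_digitA (PySem.List.slice cs (some 0) (some 9)))] else checks0
     let c19 := PySem.List.pyGetD cs 19 ' '
     let checks2 := if PySem.Chars.isdigit c19 then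
       checks1 ++ [("dob", (c19.toNat : Int) - 48, check_digitA (PySem.List.slice cs (some 13) (some 19)))] else checks1
     let c27 := PySem.List.pyGetD cs 27 ' '
     let checks3 := if PySem.Chars.isdigit c27 then
       checks2 ++ [("expiry", (c27.toNat : Int) - 48, check_digitA (PySem.List.slice cs (some 21) (some 27)))] else checks2
     let c42 := PySem.List.pyGetD cs 42 ' '
     let checks4 := if PySem.Chars.isdigit c42 then
       checks3 ++ [("optional_data", (c42.toNat : Int) - 48, check_digitA (PySem.List.slice cs (some 28) (some 42)))] else checks3
     let composite := PySem.List.slice cs (some 0) (some 10) ++ PySem.List.slice cs (some 13) (some 20)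
                        ++ PySem.List.slice cs (some 21) (some 43)
     let c43 := PySem.List.pyGetD cs 43 ' '
     let checks5 := if PySem.Chars.isdigit c43 then
       checks4 ++ [("overall", (c43.toNat : Int) - 48, check_digitA composite)] else checks4
     let all_pass := checks5.all (fun c => c.2.1 == c.2.2)
     let warnings := if !all_pass then
         [pvFailMsg ((checks5.filter (fun c => !(c.2.1 == c.2.2))).map (·.1))]
       else []
     (all_pass, warnings))
    =
    (let fields : List (String × Int × List Char) :=
       [("passport_number", 9, PySem.List.slice cs (some 0) (some 9)),
        ("dob", 19, PySem.List.slice cs (some 13) (some 19)),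
        ("expiry", 27, PySem.List.slice cs (some 21) (some 27)),
        ("optional_data", 42, PySem.List.slice cs (some 28) (some 42)),
        ("overall", 43, PySem.List.slice cs (some 0) (some 10) ++ PySem.List.slice cs (some 13) (some 20)
                          ++ PySem.List.slice cs (some 21) (some 43))]
     let failed := (fields.filter (fun f =>
         let c := PySem.List.pyGetD cs f.2.1 ' '
         PySem.Chars.isdigit c && !(((c.toNat : Int) - 48) == pvCheckB f.2.2))).map (·.1)
     if !failed.isEmpty then (false, [pvFailMsg failed])
     else (true, [])) := by
  simp only [pvCheck_eq]
  show (let CL := (pvFields cs).foldl (fun a f => if pvDigitAt cs f then a ++ [pvTriple cs f] else a) []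
        (CL.all (fun c => c.2.1 == c.2.2),
         if !(CL.all (fun c => c.2.1 == c.2.2)) then
           [pvFailMsg ((CL.filter (fun c => !(c.2.1 == c.2.2))).map (·.1))] else []))
      = (let failed := ((pvFields cs).filter (fun f =>
             pvDigitAt cs f && !((((PySem.List.pyGetD cs f.2.1 ' ').toNat : Int) - 48) == pvCheckB f.2.2))).map (·.1)
         if !failed.isEmpty then (false, [pvFailMsg failed]) else (true, []))
  simp only [pv_chain, List.nil_append, List.all_map, List.filter_map, List.map_map]
  rw [pv_all_eq _ _ (fun f : String × Int × List Char => f.1)]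
  simp only [List.filter_filter]
  simp only [Function.comp]
  simp only [pvTriple]
  simp only [Bool.and_comm]
  rw [show ((fun x : String × Int × Int => x.1) ∘ pvTriple cs) = (fun f : String × Int × List Char => f.1) from rfl]
  cases hE : (List.map (fun f : String × Int × List Char => f.1)
      (List.filter (fun a => pvDigitAt cs a && !(((PySem.List.pyGetD cs a.2.1 ' ').toNat : Int) - 48 == pvCheckB a.2.2))
        (pvFields cs))).isEmpty
  · simp
  · simp

-- ===== VERDICT (by name: the statement is the Claim_ definition above) =====
theorem validate_mrz_spec : Claim_equal_validate_mrz := by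
  intro line2 _
  unfold Spec_validate_mrz validate_mrz validate_mrz_alt
  cases line2 with
  | none => rfl
  | some s0 =>
    simp only
    by_cases h1 : s0.toList.isEmpty = true
    · rw [if_pos h1, if_pos h1]
    · rw [if_neg h1, if_neg h1]
      by_cases h2 : (PySem.Chars.upper (PySem.Chars.replace s0.toList [' '] [])).length < 44
      · rw [if_pos h2, if_pos h2]
      · rw [if_neg h2, if_neg h2]
        exact pv_branch _
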